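-- pv_equiv track=rewrite | github.com/YosefAranbaev/graphics-2d-transformations | shape_utils.py | get_biggest_y
-- ===== SOURCE A (Python) =====
-- def get_biggest_y(shape_dictionary):
--     biggest_y = 0
--     for shape_type in shape_dictionary:
--         for shape in shape_dictionary[shape_type]:
--             if shape_type == 'line':
--                 _, _, y1, _, y2 = shape
--                 if y1 > biggest_y:
--                     biggest_y = y1
--                 if y2 > biggest_y:
--                     biggest_y = y2
--             elif shape_type == 'circle':
--                 _, _, y, radius = shape
--                 if y + radius > biggest_y:
--                     biggest_y = y + radius
--             elif shape_type == 'curve':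
--                 _, _, start_y, _, end_y, _, cp_y = shape
--                 if start_y > biggest_y:
--                     biggest_y = start_y
--                 if end_y > biggest_y:
--                     biggest_y = end_y
--                 if cp_y > biggest_y:
--                     biggest_y = cp_y
--     return biggest_y
-- ===== SOURCE B (Python) =====
-- def get_biggest_y(shape_dictionary):
--     # stage 1: summarise each shape by its single highest y-coordinate
--     tops = []
--     for shape_type, shapes in shape_dictionary.items():
--         if shape_type == 'line':
--             tops.extend(max(s[2], s[4]) for s in shapes)
--         elif shape_type == 'circle':
--             tops.extend(s[2] + s[3] for s in shapes)
--         elif shape_type == 'curve':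
--             tops.extend(max(s[2], s[4], s[6]) for s in shapes)
--     # stage 2: selection by sorting; floor the answer at 0
--     tops.sort()
--     if tops and tops[-1] > 0:
--         return tops[-1]
--     return 0
-- ===== Notes on version B (the rewrite author's own statement) =====
-- stated objective: alternative
-- what changed: B is a staged pipeline instead of a running-max scan: it first summarises every shape into one per-shape top y (by positional indexing, not tuple unpacking), then selects the answer by sorting the summaries and taking the last element, flooring at 0; A instead threads a single accumulator through per-candidate comparisons.
import Mathlib
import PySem

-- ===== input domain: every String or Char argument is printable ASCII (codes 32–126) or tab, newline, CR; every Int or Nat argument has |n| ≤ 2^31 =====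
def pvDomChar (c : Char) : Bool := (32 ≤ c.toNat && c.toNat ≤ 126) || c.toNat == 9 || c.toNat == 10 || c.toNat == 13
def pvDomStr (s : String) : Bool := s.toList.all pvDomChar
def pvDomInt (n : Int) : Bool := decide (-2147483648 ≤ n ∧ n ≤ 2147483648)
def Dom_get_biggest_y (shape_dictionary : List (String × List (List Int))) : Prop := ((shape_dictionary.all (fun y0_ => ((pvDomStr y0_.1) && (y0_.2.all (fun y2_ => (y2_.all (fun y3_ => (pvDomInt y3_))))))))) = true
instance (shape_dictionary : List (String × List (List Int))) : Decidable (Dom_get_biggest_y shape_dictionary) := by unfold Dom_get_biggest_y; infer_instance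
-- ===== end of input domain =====

-- B restructures A's single running-max scan into a staged pipeline: per-shape top-y summaries
-- (by positional indexing), then selection by sorting the summaries and taking the last, floored at 0.


-- ===== PORT A =====
-- literal port of A's loop body: per-shape running-max update; list patterns mirror Python's
-- tuple unpacking (wrong lengths raise ValueError in Python and are outside Pre_).
def stepA (t : String) (b : Int) (shape : List Int) : Int :=
  if t == "line" then
    match shape with
    | [_, _, y1, _, y2] =>
      let b1 := if y1 > b then y1 else b
      if y2 > b1 then y2 else b1
    | _ => b
  else if t == "circle" then
    match shape with
    | [_, _, y, radius] => if y + radius > b then y + radius else b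
    | _ => b
  else if t == "curve" then
    match shape with
    | [_, _, start_y, _, end_y, _, cp_y] =>
      let b1 := if start_y > b then start_y else b
      let b2 := if end_y > b1 then end_y else b1
      if cp_y > b2 then cp_y else b2
    | _ => b
  else b

def get_biggest_y (shape_dictionary : List (String × List (List Int))) : Int :=
  shape_dictionary.foldl (fun biggest p =>
    p.2.foldl (fun b shape => stepA p.1 b shape) biggest) 0

-- ===== PORT B =====
-- transliteration of Source B: stage 1 builds the per-shape top list (Python s[i] is getD here: Pre_
-- guarantees the shape lengths, so the index is always in range); stage 2 is tops.sort() followed by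
-- 'tops[-1] if tops and tops[-1] > 0 else 0' (tops[-1] of the nonempty sorted list is getLastD).
def get_biggest_y_alt (shape_dictionary : List (String × List (List Int))) : Int :=
  let tops := shape_dictionary.foldl (fun acc p =>
    if p.1 == "line" then acc ++ p.2.map (fun s => max (s.getD 2 0) (s.getD 4 0))
    else if p.1 == "circle" then acc ++ p.2.map (fun s => s.getD 2 0 + s.getD 3 0)
    else if p.1 == "curve" then acc ++ p.2.map (fun s => max (s.getD 2 0) (max (s.getD 4 0) (s.getD 6 0)))
    else acc) []
  let sortedTops := PySem.List.sorted tops (fun x => x) false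
  if sortedTops ≠ [] ∧ sortedTops.getLastD 0 > 0 then sortedTops.getLastD 0 else 0

-- ===== PRECONDITION & SPEC =====
-- Pre_ excludes (a) duplicate keys, which a Python dict cannot represent (the association list is the
-- dict's item list), and (b) shapes whose length does not fit their type, on which A's unpacking raises ValueError.
def Pre_get_biggest_y (shape_dictionary : List (String × List (List Int))) : Prop :=
  (shape_dictionary.map Prod.fst).Nodup ∧
  ∀ p ∈ shape_dictionary, ∀ s ∈ p.2,
    (p.1 = "line" → s.length = 5) ∧ (p.1 = "circle" → s.length = 4) ∧ (p.1 = "curve" → s.length = 7)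
instance (shape_dictionary : List (String × List (List Int))) : Decidable (Pre_get_biggest_y shape_dictionary) := by
  unfold Pre_get_biggest_y; infer_instance

def pvWitness_get_biggest_y : (List (String × List (List Int))) :=
  [("line", [[0, 0, 3, 0, 9]]), ("circle", [[0, 0, 5, 3]]), ("curve", [[0, 0, 1, 0, 12, 0, 7]])]

def Spec_get_biggest_y (shape_dictionary : List (String × List (List Int))) (out : Int) : Prop := out = get_biggest_y_alt shape_dictionary
instance (shape_dictionary : List (String × List (List Int))) (out : Int) : Decidable (Spec_get_biggest_y shape_dictionary out) := by unfold Spec_get_biggest_y; infer_instance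

-- ===== CLAIM (what is proved, stated in full; the proofs are below) =====
def Claim_equal_get_biggest_y : Prop := ∀ (shape_dictionary : List (String × List (List Int))), Dom_get_biggest_y shape_dictionary → Pre_get_biggest_y shape_dictionary → Spec_get_biggest_y shape_dictionary (get_biggest_y shape_dictionary)

-- ===== LEMMAS AND PROOFS =====

-- the y-candidates one (shape_type, shape) pair contributes, in A's inspection order
def ysOf (t : String) (shape : List Int) : List Int :=
  if t == "line" then [shape.getD 2 0, shape.getD 4 0]
  else if t == "circle" then [shape.getD 2 0 + shape.getD 3 0]
  else if t == "curve" then [shape.getD 2 0, shape.getD 4 0, shape.getD 6 0]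
  else []

-- B's per-shape top summaries for one dict item
def topsOf (p : String × List (List Int)) : List Int :=
  if p.1 == "line" then p.2.map (fun s => max (s.getD 2 0) (s.getD 4 0))
  else if p.1 == "circle" then p.2.map (fun s => s.getD 2 0 + s.getD 3 0)
  else if p.1 == "curve" then p.2.map (fun s => max (s.getD 2 0) (max (s.getD 4 0) (s.getD 6 0)))
  else []

theorem len5 (s : List Int) (h : s.length = 5) : ∃ u1 u2 u3 u4 u5, s = [u1, u2, u3, u4, u5] := by
  rcases s with _ | ⟨a1, _ | ⟨a2, _ | ⟨a3, _ | ⟨a4, _ | ⟨a5, r⟩⟩⟩⟩⟩ <;> simp_all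

theorem len4 (s : List Int) (h : s.length = 4) : ∃ u1 u2 u3 u4, s = [u1, u2, u3, u4] := by
  rcases s with _ | ⟨a1, _ | ⟨a2, _ | ⟨a3, _ | ⟨a4, r⟩⟩⟩⟩ <;> simp_all

theorem len7 (s : List Int) (h : s.length = 7) :
    ∃ u1 u2 u3 u4 u5 u6 u7, s = [u1, u2, u3, u4, u5, u6, u7] := by
  rcases s with _ | ⟨a1, _ | ⟨a2, _ | ⟨a3, _ | ⟨a4, _ | ⟨a5, _ | ⟨a6, _ | ⟨a7, r⟩⟩⟩⟩⟩⟩⟩ <;> simp_all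

theorem stepA_eq (t : String) (b : Int) (s : List Int)
    (h : (t = "line" → s.length = 5) ∧ (t = "circle" → s.length = 4) ∧ (t = "curve" → s.length = 7)) :
    stepA t b s = List.foldl max b (ysOf t s) := by
  unfold stepA ysOf
  obtain ⟨h5, h4, h7⟩ := h
  split_ifs with h1 h2 h3
  · obtain ⟨u1, u2, u3, u4, u5, rfl⟩ := len5 s (h5 (by simpa using h1))
    simp only [List.foldl, List.getD, List.getElem?_cons_succ, List.getElem?_cons_zero,
      Option.getD_some]
    split_ifs <;> omega
  · obtain ⟨u1, u2, u3, u4, rfl⟩ := len4 s (h4 (by simpa using h2))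
    simp only [List.foldl, List.getD, List.getElem?_cons_succ, List.getElem?_cons_zero,
      Option.getD_some]
    split_ifs <;> omega
  · obtain ⟨u1, u2, u3, u4, u5, u6, u7, rfl⟩ := len7 s (h7 (by simpa using h3))
    simp only [List.foldl, List.getD, List.getElem?_cons_succ, List.getElem?_cons_zero,
      Option.getD_some]
    split_ifs <;> omega
  · rfl

-- A's whole fold is the running max over all contributed candidates, in dict order
theorem A_char (d : List (String × List (List Int)))
    (hlen : ∀ p ∈ d, ∀ s ∈ p.2,
      (p.1 = "line" → s.length = 5) ∧ (p.1 = "circle" → s.length = 4) ∧ (p.1 = "curve" → s.length = 7)) :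
    get_biggest_y d = List.foldl max 0 (d.flatMap fun p => p.2.flatMap (ysOf p.1)) := by
  unfold get_biggest_y
  suffices h : ∀ b : Int,
      d.foldl (fun biggest p => p.2.foldl (fun b shape => stepA p.1 b shape) biggest) b
      = List.foldl max b (d.flatMap fun p => p.2.flatMap (ysOf p.1)) from h 0
  induction d with
  | nil => intro b; rfl
  | cons p d ih =>
    intro b
    rw [List.foldl_cons, List.flatMap_cons, List.foldl_append]
    have hinner : ∀ (ss : List (List Int)), (∀ s ∈ ss,
        (p.1 = "line" → s.length = 5) ∧ (p.1 = "circle" → s.length = 4) ∧ (p.1 = "curve" → s.length = 7)) →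
        ∀ b : Int,
        ss.foldl (fun b shape => stepA p.1 b shape) b = List.foldl max b (ss.flatMap (ysOf p.1)) := by
      intro ss hss
      induction ss with
      | nil => intro b; rfl
      | cons s ss ih2 =>
        intro b
        rw [List.foldl_cons, List.flatMap_cons, List.foldl_append,
          stepA_eq p.1 b s (hss s List.mem_cons_self)]
        exact ih2 (fun s' hs' => hss s' (List.mem_cons_of_mem _ hs')) _
    rw [hinner p.2 (hlen p List.mem_cons_self) b]
    exact ih (fun q hq => hlen q (List.mem_cons_of_mem _ hq)) _

-- B's stage-1 fold builds exactly the concatenation of the per-item top lists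
theorem tops_eq (d : List (String × List (List Int))) :
    d.foldl (fun acc p =>
      if p.1 == "line" then acc ++ p.2.map (fun s => max (s.getD 2 0) (s.getD 4 0))
      else if p.1 == "circle" then acc ++ p.2.map (fun s => s.getD 2 0 + s.getD 3 0)
      else if p.1 == "curve" then acc ++ p.2.map (fun s => max (s.getD 2 0) (max (s.getD 4 0) (s.getD 6 0)))
      else acc) []
    = d.flatMap topsOf := by
  have hfun : (fun (acc : List Int) (p : String × List (List Int)) =>
      if p.1 == "line" then acc ++ p.2.map (fun s => max (s.getD 2 0) (s.getD 4 0))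
      else if p.1 == "circle" then acc ++ p.2.map (fun s => s.getD 2 0 + s.getD 3 0)
      else if p.1 == "curve" then acc ++ p.2.map (fun s => max (s.getD 2 0) (max (s.getD 4 0) (s.getD 6 0)))
      else acc) = fun acc p => acc ++ topsOf p := by
    funext acc p; unfold topsOf; split_ifs <;> simp
  rw [hfun]
  exact (PySem.List.foldl_append_eq_flatMap topsOf d []).trans (List.nil_append _)

-- the default of getLastD is irrelevant on a nonempty list
theorem getLastD_congr {l : List Int} (h : l ≠ []) (d1 d2 : Int) :
    l.getLastD d1 = l.getLastD d2 := by
  rw [List.getLastD_eq_getLast?, List.getLastD_eq_getLast?, List.getLast?_eq_some_getLast h]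
  rfl

-- running max over a nondecreasing list is max with its last element
theorem foldl_max_pairwise : ∀ (l : List Int), l.Pairwise (· ≤ ·) →
    ∀ a : Int, List.foldl max a l = max a (l.getLastD a) := by
  intro l
  induction l with
  | nil => intro _ a; simp
  | cons x rest ih =>
    intro hl a
    rcases List.pairwise_cons.mp hl with ⟨hx, hrest⟩
    rw [List.foldl_cons, ih hrest (max a x), List.getLastD_cons]
    rcases rest with _ | ⟨y, r⟩
    · simp [List.getLastD]
    · have hne : (y :: r) ≠ ([] : List Int) := by simp
      rw [getLastD_congr hne (max a x) x]
      have hxle : x ≤ (y :: r).getLastD x := by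
        rw [List.getLastD_eq_getLast?, List.getLast?_eq_some_getLast hne]
        exact hx _ (List.getLast_mem hne)
      rw [max_assoc, max_eq_right hxle]

-- B equals the running max over the concatenated top lists
theorem B_char (d : List (String × List (List Int))) :
    get_biggest_y_alt d = List.foldl max 0 (d.flatMap topsOf) := by
  simp only [get_biggest_y_alt]
  rw [tops_eq]
  have hperm := PySem.List.sorted_perm (d.flatMap topsOf) (fun x => x) false
  have hpw : (PySem.List.sorted (d.flatMap topsOf) (fun x => x) false).Pairwise (· ≤ ·) := by
    simpa using PySem.List.sorted_pairwise (d.flatMap topsOf) (fun x => x)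
  rw [(List.Perm.foldl_eq (f := max) hperm 0).symm, foldl_max_pairwise _ hpw 0]
  rcases hs : PySem.List.sorted (d.flatMap topsOf) (fun x => x) false with _ | ⟨h, t⟩
  · simp
  · have hne : (h :: t) ≠ ([] : List Int) := by simp
    split_ifs with hc
    · exact (max_eq_right (le_of_lt hc.2)).symm
    · have : (h :: t).getLastD 0 ≤ 0 := by
        by_contra hgt
        exact hc ⟨hne, by omega⟩
      exact (max_eq_left this).symm

-- the per-candidate running max equals the per-summary running max, item by item
theorem foldl_max_ysOf_eq_topsOf (t : String) (ss : List (List Int)) : ∀ b : Int,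
    List.foldl max b (ss.flatMap (ysOf t)) = List.foldl max b (topsOf (t, ss)) := by
  induction ss with
  | nil => intro b; simp [topsOf]
  | cons s ss ih =>
    intro b
    have hstep : ∀ b' : Int, List.foldl max b' (ysOf t s) = List.foldl max b' (topsOf (t, [s])) := by
      intro b'
      unfold ysOf topsOf
      split_ifs <;> simp [List.foldl, max_assoc]
    have hsplit : topsOf (t, s :: ss) = topsOf (t, [s]) ++ topsOf (t, ss) := by
      unfold topsOf; split_ifs <;> simp
    rw [List.flatMap_cons, List.foldl_append, hsplit, List.foldl_append, hstep, ih]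

theorem foldl_ys_eq_tops (d : List (String × List (List Int))) : ∀ b : Int,
    List.foldl max b (d.flatMap fun p => p.2.flatMap (ysOf p.1))
    = List.foldl max b (d.flatMap topsOf) := by
  induction d with
  | nil => intro b; rfl
  | cons p d ih =>
    intro b
    rw [List.flatMap_cons, List.flatMap_cons, List.foldl_append, List.foldl_append,
      foldl_max_ysOf_eq_topsOf p.1 p.2 b]
    exact ih _

-- ===== VERDICT (by name: the statement is the Claim_ definition above) =====
theorem get_biggest_y_spec : Claim_equal_get_biggest_y := by
  intro d _ hpre
  unfold Spec_get_biggest_y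
  rw [A_char d hpre.2, B_char, foldl_ys_eq_tops d 0]
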